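-- pv_equiv track=rewrite | github.com/ttulibraries/IRAutomation | upload_record_UI.py | read_dois
-- ===== SOURCE A (Python) =====
-- def read_dois(dois_file):
--     '''
--     Purpose: Function reads and returns all the DOIs in the file
--     Input: DOIs file object
--     Output: List with just DOIs
--     '''
--     num_dois = []
--     for line in dois_file:
--         doi = line.strip()
--         if 'doi.org' in doi:
--             split_doi = doi.split('/')
--             for piece in split_doi:
--                 if '10.' in piece:
--                     num_dois.append('/'.join(split_doi[split_doi.index(piece):]))
--                     break
--             #num_dois.append('/'.join(doi.split('/')[-2:]))
--         else:
--             num_dois.append(doi)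
--     return num_dois
-- ===== SOURCE B (Python) =====
-- def read_dois(dois_file):
--     '''
--     Purpose: Function reads and returns all the DOIs in the file
--     Input: DOIs file object
--     Output: List with just DOIs
--     '''
--     num_dois = []
--     for line in dois_file:
--         doi = line.strip()
--         if 'doi.org' in doi:
--             pos = doi.find('10.')
--             if pos != -1:
--                 num_dois.append(doi[doi.rfind('/', 0, pos) + 1:])
--         else:
--             num_dois.append(doi)
--     return num_dois
-- ===== Notes on version B (the rewrite author's own statement) =====
-- stated objective: simpler
-- what changed: B drops A's split('/')-into-pieces / linear piece scan / list.index / '/'.join pipeline and instead locates the first '10.' with str.find and slices the line from just after the '/' preceding it (str.rfind with an end bound); this is exact because '10.' never spans a '/' boundary.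
import Mathlib
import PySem

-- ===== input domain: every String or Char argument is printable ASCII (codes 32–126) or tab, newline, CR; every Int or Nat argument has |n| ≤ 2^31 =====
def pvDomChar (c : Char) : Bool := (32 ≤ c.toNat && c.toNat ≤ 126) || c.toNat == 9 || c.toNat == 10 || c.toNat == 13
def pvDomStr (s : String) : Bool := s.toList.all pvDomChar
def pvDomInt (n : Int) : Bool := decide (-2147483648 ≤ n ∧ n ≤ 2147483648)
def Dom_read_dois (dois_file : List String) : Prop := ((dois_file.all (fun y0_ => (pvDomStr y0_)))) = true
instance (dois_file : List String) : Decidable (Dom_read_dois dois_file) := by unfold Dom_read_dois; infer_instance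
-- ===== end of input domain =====

-- B replaces A's split-into-pieces / scan / list.index / join pipeline by direct string
-- search: find the first '10.' and slice from just after the '/' preceding it (simpler,
-- no intermediate list of pieces).

-- ===== PORT A =====
-- the inner `for piece in split_doi: if '10.' in piece: ...append...; break` loop of A;
-- returns the value appended, if any.  `index?` never returns none here (every piece
-- scanned is drawn from split_doi itself), so the `.getD 0` default is unreachable.
def readDoisScanA (split_doi : List (List Char)) : List (List Char) → Option (List Char)
  | [] => none
  | piece :: rest =>
    if PySem.Chars.isIn "10.".toList piece then
      some (PySem.Chars.join "/".toList
        (PySem.List.slice split_doi (some (((PySem.List.index? split_doi piece).getD 0 : Nat) : Int)) none))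
    else readDoisScanA split_doi rest

def read_dois (dois_file : List String) : List String :=
  dois_file.foldl (fun num_dois line =>
    let doi := PySem.Chars.strip line.toList
    if PySem.Chars.isIn "doi.org".toList doi then
      match readDoisScanA (PySem.Chars.splitOn doi "/".toList) (PySem.Chars.splitOn doi "/".toList) with
      | some v => num_dois ++ [String.ofList v]
      | none => num_dois
    else num_dois ++ [String.ofList doi]) []

-- ===== PORT B =====
def read_dois_alt (dois_file : List String) : List String :=
  dois_file.foldl (fun num_dois line =>
    let doi := PySem.Chars.strip line.toList
    if PySem.Chars.isIn "doi.org".toList doi then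
      let pos := PySem.Chars.find doi "10.".toList
      if pos ≠ -1 then
        num_dois ++ [String.ofList (PySem.Chars.slice doi
          (some (PySem.Chars.rfindFrom doi "/".toList 0 (some pos) + 1)) none)]
      else num_dois
    else num_dois ++ [String.ofList doi]) []

-- ===== PRECONDITION & SPEC =====
def Spec_read_dois (dois_file : List String) (out : List String) : Prop := out = read_dois_alt dois_file
instance (dois_file : List String) (out : List String) : Decidable (Spec_read_dois dois_file out) := by unfold Spec_read_dois; infer_instance

-- ===== CLAIM (what is proved, stated in full; the proofs are below) =====
def Claim_equal_read_dois : Prop := ∀ (dois_file : List String), Dom_read_dois dois_file → Spec_read_dois dois_file (read_dois dois_file)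

-- ===== LEMMAS AND PROOFS =====

-- reference version of `split('/')`, structurally recursive on the string
def mySplit : List Char → List (List Char)
  | [] => [[]]
  | c :: rest => if c = '/' then [] :: mySplit rest else (mySplit rest).modifyHead (c :: ·)

lemma mySplit_ne_nil (cs : List Char) : mySplit cs ≠ [] := by
  induction cs with
  | nil => simp [mySplit]
  | cons c rest ih =>
    simp only [mySplit]
    split
    · simp
    · cases h : mySplit rest with
      | nil => exact absurd h ih
      | cons y r => simp

lemma go_nil (f : Nat) (cur : List Char) (acc : List (List Char)) :
    PySem.Chars.splitOn.go ['/'] (f+1) [] cur acc = (cur.reverse :: acc).reverse := by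
  simp [PySem.Chars.splitOn.go]

lemma go_slash (f : Nat) (rest cur : List Char) (acc : List (List Char)) :
    PySem.Chars.splitOn.go ['/'] (f+1) ('/' :: rest) cur acc =
      PySem.Chars.splitOn.go ['/'] f rest [] (cur.reverse :: acc) := by
  rw [PySem.Chars.splitOn.go]
  simp [List.isPrefixOf]

lemma go_cons (f : Nat) (c : Char) (rest cur : List Char) (acc : List (List Char)) (h : c ≠ '/') :
    PySem.Chars.splitOn.go ['/'] (f+1) (c :: rest) cur acc =
      PySem.Chars.splitOn.go ['/'] f rest (c :: cur) acc := by
  rw [PySem.Chars.splitOn.go]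
  simp [List.isPrefixOf, Ne.symm h]

lemma splitOn_go_eq (fuel : Nat) (l cur : List Char) (acc : List (List Char))
    (h : l.length < fuel) :
    PySem.Chars.splitOn.go ['/'] fuel l cur acc
      = acc.reverse ++ (mySplit l).modifyHead (cur.reverse ++ ·) := by
  induction fuel generalizing l cur acc with
  | zero => omega
  | succ f ih =>
    cases l with
    | nil => rw [go_nil]; simp [mySplit]
    | cons c rest =>
      by_cases hc : c = '/'
      · subst hc
        rw [go_slash, ih rest [] (cur.reverse :: acc) (by simp at h ⊢; omega)]
        cases hm : mySplit rest with
        | nil => exact absurd hm (mySplit_ne_nil rest)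
        | cons y r => simp [mySplit, hm]
      · rw [go_cons _ _ _ _ _ hc, ih rest (c :: cur) acc (by simp at h ⊢; omega)]
        cases hm : mySplit rest with
        | nil => exact absurd hm (mySplit_ne_nil rest)
        | cons y r => simp [mySplit, hm, hc]

lemma splitOn_eq_mySplit (cs : List Char) :
    PySem.Chars.splitOn cs "/".toList = mySplit cs := by
  rw [show "/".toList = ['/'] from rfl, PySem.Chars.splitOn, splitOn_go_eq _ _ _ _ (by omega)]
  cases hm : mySplit cs with
  | nil => exact absurd hm (mySplit_ne_nil cs)
  | cons y r => simp

lemma mySplit_no_slash {cs : List Char} (h : '/' ∉ cs) : mySplit cs = [cs] := by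
  induction cs with
  | nil => simp [mySplit]
  | cons c rest ih =>
    have hc : c ≠ '/' := by rintro rfl; exact h (List.mem_cons_self ..)
    simp [mySplit, hc, ih (fun hm => h (List.mem_cons_of_mem _ hm))]

lemma mySplit_append {a b : List Char} (h : '/' ∉ a) :
    mySplit (a ++ '/' :: b) = a :: mySplit b := by
  induction a with
  | nil => simp [mySplit]
  | cons c a' ih =>
    have hc : c ≠ '/' := by rintro rfl; exact h (List.mem_cons_self ..)
    simp [mySplit, hc, ih (fun hm => h (List.mem_cons_of_mem _ hm))]

lemma join_mySplit (cs : List Char) :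
    PySem.Chars.join "/".toList (mySplit cs) = cs := by
  induction cs with
  | nil => simp [mySplit, PySem.Chars.join_singleton]
  | cons c rest ih =>
    by_cases hc : c = '/'
    · subst hc
      cases hm : mySplit rest with
      | nil => exact absurd hm (mySplit_ne_nil rest)
      | cons y r =>
        rw [hm] at ih
        have h1 : mySplit ('/' :: rest) = [] :: y :: r := by simp [mySplit, hm]
        rw [h1, PySem.Chars.join_cons_cons, ih]
        rfl
    · cases hm : mySplit rest with
      | nil => exact absurd hm (mySplit_ne_nil rest)
      | cons y r =>
        rw [hm] at ih
        have h1 : mySplit (c :: rest) = (c :: y) :: r := by simp [mySplit, hc, hm]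
        rw [h1]
        cases r with
        | nil =>
          rw [PySem.Chars.join_singleton] at ih ⊢
          rw [ih]
        | cons z r' =>
          rw [PySem.Chars.join_cons_cons] at ih ⊢
          rw [← ih]
          simp

lemma find_eq_natCast_iff (s sub : List Char) (n : Nat) :
    PySem.Chars.find s sub = (n : Int) ↔
      (sub <+: s.drop n ∧ ∀ i < n, ¬ sub <+: s.drop i) := by
  constructor
  · intro h
    have h0 : 0 ≤ PySem.Chars.find s sub := by rw [h]; exact Int.natCast_nonneg n
    obtain ⟨hpre, hmin⟩ := PySem.Chars.find_spec h0
    rw [h] at hpre hmin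
    simpa using ⟨hpre, hmin⟩
  · rintro ⟨hpre, hmin⟩
    have hinf : sub <:+: s := (PySem.Chars.isIn_iff_infix sub s).mp
      ((PySem.Chars.exists_prefix_drop_iff_isIn sub s).mp ⟨n, hpre⟩)
    have h0 : 0 ≤ PySem.Chars.find s sub := (PySem.Chars.find_nonneg_iff s sub).mpr hinf
    obtain ⟨hp2, hm2⟩ := PySem.Chars.find_spec h0
    rcases lt_trichotomy (PySem.Chars.find s sub).toNat n with hlt | heq | hgt
    · exact absurd hp2 (hmin _ hlt)
    · omega
    · exact absurd hpre (hm2 n hgt)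

lemma isIn_false_iff_find (sub s : List Char) :
    PySem.Chars.isIn sub s = false ↔ PySem.Chars.find s sub = -1 := by
  simp [PySem.Chars.isIn]

lemma prefix_append_iff_le {u v : List Char} (w : List Char) (h : u.length ≤ v.length) :
    u <+: v ++ w ↔ u <+: v := by
  constructor
  · rintro ⟨t, ht⟩
    have : u = (v ++ w).take u.length := by
      rw [← ht]; simp
    rw [List.take_append_of_le_length h] at this
    exact this ▸ List.take_prefix _ _
  · exact fun hp => hp.trans (List.prefix_append v w)

lemma ten_prefix_drop_append (a b : List Char) (i : Nat) :
    ['1','0','.'] <+: (a ++ '/' :: b).drop i ↔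
      ((i + 3 ≤ a.length ∧ ['1','0','.'] <+: a.drop i) ∨
       (a.length < i ∧ ['1','0','.'] <+: b.drop (i - a.length - 1))) := by
  rcases Nat.lt_or_ge a.length i with hi | hi
  swap
  · rw [List.drop_append_of_le_length hi]
    rcases Nat.lt_or_ge a.length (i+3) with h3 | h3
    swap
    · rw [prefix_append_iff_le _ (by simp; omega)]
      constructor
      · exact fun hp => Or.inl ⟨h3, hp⟩
      · rintro (⟨_, hp⟩ | ⟨hlt, _⟩)
        · exact hp
        · omega
    · constructor
      · rintro ⟨t, ht⟩
        have hj : (List.drop i a ++ '/' :: b)[a.length - i]? = some '/' := by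
          rw [List.getElem?_append_right (by simp)]
          simp
        rw [← ht] at hj
        have hjlt : a.length - i < 3 := by omega
        rw [List.getElem?_append_left (by simpa using hjlt)] at hj
        have : '/' ∈ (['1','0','.'] : List Char) := List.mem_of_getElem? hj
        simp at this
      · rintro (⟨h', _⟩ | ⟨h', _⟩) <;> omega
  · have hdrop : List.drop (i - a.length) ('/' :: b) = List.drop (i - a.length - 1) b := by
      rw [show i - a.length = (i - a.length - 1) + 1 by omega]
      exact List.drop_succ_cons
    rw [List.drop_append, List.drop_eq_nil_of_le (le_of_lt hi), hdrop, List.nil_append]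
    constructor
    · exact fun hp => Or.inr ⟨hi, hp⟩
    · rintro (⟨h', _⟩ | ⟨_, hp⟩)
      · omega
      · exact hp

lemma rfind_go_neg (s sub : List Char) (j : Nat)
    (h : ∀ k ≤ j, ¬ sub <+: s.drop k) :
    PySem.Chars.rfind.go s sub j = -1 := by
  induction j with
  | zero =>
    rw [PySem.Chars.rfind.go,
      if_neg (by simpa [List.isPrefixOf_iff_prefix] using h 0 (le_refl 0))]
  | succ j ih =>
    rw [PySem.Chars.rfind.go,
      if_neg (by simpa [List.isPrefixOf_iff_prefix] using h (j+1) (le_refl _))]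
    exact ih (fun k hk => h k (Nat.le_succ_of_le hk))

lemma rfind_go_pos (s sub : List Char) (j k : Nat) (hk : k ≤ j)
    (hp : sub <+: s.drop k) (hmax : ∀ i, k < i → i ≤ j → ¬ sub <+: s.drop i) :
    PySem.Chars.rfind.go s sub j = (k : Int) := by
  induction j with
  | zero =>
    have hk0 : k = 0 := by omega
    subst hk0
    rw [PySem.Chars.rfind.go, if_pos (by simpa [List.isPrefixOf_iff_prefix] using hp)]
    simp
  | succ j ih =>
    rcases Nat.lt_or_ge k (j+1) with hlt | hge
    · rw [PySem.Chars.rfind.go,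
        if_neg (by simpa [List.isPrefixOf_iff_prefix] using hmax (j+1) hlt (le_refl _))]
      exact ih (by omega) (fun i h1 h2 => hmax i h1 (Nat.le_succ_of_le h2))
    · have : k = j + 1 := by omega
      subst this
      rw [PySem.Chars.rfind.go, if_pos (by simpa [List.isPrefixOf_iff_prefix] using hp)]

lemma singleton_prefix_iff (c : Char) (v : List Char) : [c] <+: v ↔ v.head? = some c := by
  cases v with
  | nil => simp
  | cons h t => simp [List.cons_prefix_cons, eq_comm]

lemma slash_prefix_drop (u : List Char) (k : Nat) :
    ['/'] <+: u.drop k ↔ u[k]? = some '/' := by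
  rw [singleton_prefix_iff, List.head?_drop]

lemma rfind_slash_of_not_mem {u : List Char} (h : '/' ∉ u) :
    PySem.Chars.rfind u "/".toList = -1 := by
  rw [PySem.Chars.rfind]
  apply rfind_go_neg
  intro k _
  rw [show "/".toList = ['/'] from rfl, slash_prefix_drop]
  intro hc
  exact h (List.mem_of_getElem? hc)

lemma rfind_slash_append_of_not_mem (a : List Char) {w : List Char} (h : '/' ∉ w) :
    PySem.Chars.rfind (a ++ '/' :: w) "/".toList = (a.length : Int) := by
  rw [PySem.Chars.rfind]
  apply rfind_go_pos _ _ _ _ (by simp only [List.length_append, List.length_cons]; omega)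
  · rw [show "/".toList = ['/'] from rfl, slash_prefix_drop]
    rw [List.getElem?_append_right (le_refl _)]
    simp
  · intro i hi _
    rw [show "/".toList = ['/'] from rfl, slash_prefix_drop]
    rw [List.getElem?_append_right (by omega)]
    rw [show i - a.length = (i - a.length - 1) + 1 by omega]
    simp only [List.getElem?_cons_succ]
    intro hc
    exact h (List.mem_of_getElem? hc)

lemma rfind_slash_append_of_mem (a : List Char) {w : List Char} (h : '/' ∈ w) :
    ∃ rb : Nat, PySem.Chars.rfind w "/".toList = (rb : Int) ∧
      PySem.Chars.rfind (a ++ '/' :: w) "/".toList = ((a.length + 1 + rb : Nat) : Int) := by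
  obtain ⟨k0, hk0lt, hk0⟩ := List.getElem_of_mem h
  set P : Nat → Prop := fun k => w[k]? = some '/' with hP
  have hk0' : P k0 := by simp [hP, List.getElem?_eq_getElem hk0lt, hk0]
  set rb := Nat.findGreatest P w.length with hrb
  have hspec : P rb := Nat.findGreatest_spec (m := k0) (by omega) hk0'
  have hgr : ∀ i, rb < i → ¬ P i := by
    intro i hi hPi
    have hilt : i < w.length := (List.getElem?_eq_some_iff.mp hPi).1
    exact Nat.findGreatest_is_greatest hi (by omega) hPi
  have hrblt : rb < w.length := (List.getElem?_eq_some_iff.mp hspec).1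
  refine ⟨rb, ?_, ?_⟩
  · rw [PySem.Chars.rfind]
    apply rfind_go_pos _ _ _ _ (by omega)
    · rw [show "/".toList = ['/'] from rfl, slash_prefix_drop]; exact hspec
    · intro i h1 _
      rw [show "/".toList = ['/'] from rfl, slash_prefix_drop]
      exact hgr i h1
  · rw [PySem.Chars.rfind]
    apply rfind_go_pos _ _ _ _ (by simp only [List.length_append, List.length_cons]; omega)
    · rw [show "/".toList = ['/'] from rfl, slash_prefix_drop]
      rw [List.getElem?_append_right (by omega)]
      rw [show a.length + 1 + rb - a.length = rb + 1 by omega]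
      simpa using hspec
    · intro i h1 _
      rw [show "/".toList = ['/'] from rfl, slash_prefix_drop]
      rw [List.getElem?_append_right (by omega)]
      rw [show i - a.length = (i - a.length - 1) + 1 by omega]
      simp only [List.getElem?_cons_succ]
      exact hgr _ (by omega)

lemma rfindFrom_zero_some (cs sub : List Char) (pos : Int) (h0 : 0 ≤ pos)
    (hle : pos ≤ cs.length) :
    PySem.Chars.rfindFrom cs sub 0 (some pos) =
      PySem.Chars.rfind (cs.take pos.toNat) sub := by
  simp only [PySem.Chars.rfindFrom]
  rw [if_neg (not_lt.mpr hle), if_neg (not_lt.mpr h0)]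
  simp only [lt_irrefl, if_false, Int.toNat_zero, List.drop_zero, zero_add,
    if_neg (not_lt.mpr h0)]
  split
  · next h => exact h.symm
  · rfl

lemma slice_from_nonneg (cs : List Char) (x : Int) (h : 0 ≤ x) :
    PySem.Chars.slice cs (some x) none = cs.drop x.toNat := by
  rw [PySem.Chars.slice_eq_listSlice, PySem.List.slice_from _ h]

-- the value B's doi.org branch appends (if any)
def valB (cs : List Char) : Option (List Char) :=
  let pos := PySem.Chars.find cs "10.".toList
  if pos ≠ -1 then
    some (PySem.Chars.slice cs (some (PySem.Chars.rfindFrom cs "/".toList 0 (some pos) + 1)) none)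
  else none

lemma tenL : "10.".toList = ['1','0','.'] := rfl
lemma slashL : "/".toList = ['/'] := rfl

lemma scanA_skip_head (a : List Char) (all rest : List (List Char))
    (ha : PySem.Chars.isIn "10.".toList a = false)
    (hsub : ∀ pc ∈ rest, pc ∈ all) :
    readDoisScanA (a :: all) rest = readDoisScanA all rest := by
  induction rest with
  | nil => rfl
  | cons pc r ih =>
    simp only [readDoisScanA]
    cases hpc : PySem.Chars.isIn "10.".toList pc with
    | false =>
      rw [if_neg (by simp), if_neg (by simp)]
      exact ih (fun x hx => hsub x (List.mem_cons_of_mem _ hx))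
    | true =>
      rw [if_pos rfl, if_pos rfl]
      have hne : (a == pc) = false := by
        apply beq_eq_false_iff_ne.mpr
        rintro rfl
        rw [hpc] at ha
        simp at ha
      obtain ⟨i, hi⟩ : ∃ i, PySem.List.index? all pc = some i := by
        cases h : PySem.List.index? all pc with
        | some i => exact ⟨i, rfl⟩
        | none =>
          exact absurd (List.idxOf?_eq_none_iff.mp h) (by simpa using hsub pc (List.mem_cons_self ..))
      have hidx : PySem.List.index? (a :: all) pc = some (i+1) := by
        simp only [PySem.List.index?] at hi ⊢
        rw [List.idxOf?_cons, if_neg (by simp [hne]), hi]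
        rfl
      rw [hi, hidx]
      simp only [Option.getD_some]
      rw [PySem.List.slice_from _ (by omega), PySem.List.slice_from _ (by omega)]
      simp

theorem valA_aux (n : Nat) : ∀ cs : List Char, cs.length ≤ n →
    readDoisScanA (mySplit cs) (mySplit cs) = valB cs := by
  induction n with
  | zero =>
    intro cs hlen
    have : cs = [] := by cases cs <;> simp_all
    subst this
    decide
  | succ n ih =>
    intro cs hlen
    by_cases hsl : '/' ∈ cs
    case neg =>
      rw [mySplit_no_slash hsl]
      cases hten : PySem.Chars.isIn ['1','0','.'] cs with
      | false =>
        rw [readDoisScanA, if_neg (by simp [hten]), readDoisScanA, valB]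
        simp only [tenL, slashL]
        rw [if_neg (by simp [(isIn_false_iff_find _ _).mp hten])]
      | true =>
        have hne : PySem.Chars.find cs ['1','0','.'] ≠ -1 := by
          simpa [PySem.Chars.isIn] using hten
        have h0 : 0 ≤ PySem.Chars.find cs ['1','0','.'] :=
          (PySem.Chars.find_nonneg_iff _ _).mpr ((PySem.Chars.isIn_iff_infix _ _).mp hten)
        rw [readDoisScanA, if_pos (by simp [hten])]
        have hidx : PySem.List.index? [cs] cs = some 0 := by
          simp [PySem.List.index?, List.idxOf?_cons]
        rw [hidx]
        simp only [Option.getD_some, Nat.cast_zero]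
        rw [PySem.List.slice_from _ (by omega)]
        simp only [Int.toNat_zero, List.drop_zero]
        rw [show PySem.Chars.join "/".toList [cs] = cs from PySem.Chars.join_singleton _ _]
        rw [valB]
        simp only [tenL, slashL]
        rw [if_pos hne]
        rw [rfindFrom_zero_some _ _ _ h0 (PySem.Chars.find_le_length _ _)]
        have hrf := rfind_slash_of_not_mem
          (u := cs.take (PySem.Chars.find cs ['1','0','.']).toNat)
          (fun hm => hsl (List.take_subset _ _ hm))
        rw [slashL] at hrf
        rw [hrf, show (-1 : Int) + 1 = 0 from by norm_num]
        rw [slice_from_nonneg _ _ (by omega)]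
        simp
    case pos =>
      -- decompose cs at its first '/'
      set p : Char → Bool := fun x => x != '/' with hp
      have hdw : cs.dropWhile p ≠ [] := by
        intro hnil
        have : cs.takeWhile p = cs := by
          have := List.takeWhile_append_dropWhile (p := p) (l := cs)
          rw [hnil, List.append_nil] at this
          exact this
        have := List.mem_takeWhile_imp (this ▸ hsl)
        simp [hp] at this
      obtain ⟨h1, b, hb⟩ : ∃ h1 b, cs.dropWhile p = h1 :: b := by
        cases hd : cs.dropWhile p with
        | nil => exact absurd hd hdw
        | cons x y => exact ⟨x, y, rfl⟩
      have hh1 : h1 = '/' := by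
        have h1eq : (List.dropWhile p cs).head hdw = h1 := by
          have h2 := congrArg List.head? hb
          rw [List.head?_eq_some_head hdw] at h2
          simpa using h2
        have h3 := List.head_dropWhile_not p hdw
        rw [h1eq] at h3
        simpa [hp] using h3
      subst hh1
      set a := cs.takeWhile p with hadef
      have hcs : cs = a ++ '/' :: b := by
        rw [hadef, ← hb, List.takeWhile_append_dropWhile]
      have hna : '/' ∉ a := by
        intro hm
        have := List.mem_takeWhile_imp (hadef ▸ hm)
        simp [hp] at this
      have hblen : b.length ≤ n := by
        have := congrArg List.length hcs
        simp at this
        omega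
      rw [hcs, mySplit_append hna]
      cases hta : PySem.Chars.isIn ['1','0','.'] a with
      | true =>
        -- the first piece already holds '10.'
        rw [readDoisScanA, if_pos (by simp [hta])]
        have hidx : PySem.List.index? (a :: mySplit b) a = some 0 := by
          simp [PySem.List.index?, List.idxOf?_cons]
        rw [hidx]
        simp only [Option.getD_some, Nat.cast_zero]
        rw [PySem.List.slice_from _ (by omega)]
        simp only [Int.toNat_zero, List.drop_zero]
        rw [← mySplit_append hna, join_mySplit]
        -- now the B side
        have h0a : 0 ≤ PySem.Chars.find a ['1','0','.'] :=
          (PySem.Chars.find_nonneg_iff _ _).mpr ((PySem.Chars.isIn_iff_infix _ _).mp hta)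
        obtain ⟨hpra, hmina⟩ := PySem.Chars.find_spec h0a
        set pa := (PySem.Chars.find a ['1','0','.']).toNat with hpa
        have hlen3 : pa + 3 ≤ a.length := by
          have := hpra.length_le
          simp at this
          have hle := PySem.Chars.find_le_length a ['1','0','.']
          omega
        have hfind_cs : PySem.Chars.find (a ++ '/' :: b) ['1','0','.'] = (pa : Int) := by
          rw [find_eq_natCast_iff]
          constructor
          · rw [ten_prefix_drop_append]
            exact Or.inl ⟨hlen3, hpra⟩
          · intro i hilt
            rw [ten_prefix_drop_append]
            rintro (⟨_, hpi⟩ | ⟨hgt, _⟩)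
            · exact hmina i hilt hpi
            · omega
        rw [valB]
        simp only [tenL, slashL, hfind_cs]
        rw [if_pos (by omega)]
        rw [rfindFrom_zero_some _ _ _ (by omega)
          (by rw [← hfind_cs]; exact PySem.Chars.find_le_length _ _)]
        rw [Int.toNat_natCast]
        rw [List.take_append_of_le_length (by omega)]
        have hrf := rfind_slash_of_not_mem (u := a.take pa)
          (fun hm => hna (List.take_subset _ _ hm))
        rw [slashL] at hrf
        rw [hrf, show (-1 : Int) + 1 = 0 from by norm_num]
        rw [slice_from_nonneg _ _ (by omega)]
        simp
      | false =>
        rw [readDoisScanA, if_neg (by simp [hta])]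
        rw [scanA_skip_head a _ _ hta (fun pc h => h)]
        rw [ih b hblen]
        -- show valB b = valB (a ++ '/' :: b)
        cases hb10 : PySem.Chars.isIn ['1','0','.'] b with
        | false =>
          have hfa := (isIn_false_iff_find _ _).mp hta
          have hfb := (isIn_false_iff_find _ _).mp hb10
          have hfcs : PySem.Chars.find (a ++ '/' :: b) ['1','0','.'] = -1 := by
            apply (isIn_false_iff_find _ _).mp
            cases hc : PySem.Chars.isIn ['1','0','.'] (a ++ '/' :: b) with
            | false => rfl
            | true =>
              obtain ⟨j, hj⟩ := (PySem.Chars.exists_prefix_drop_iff_isIn _ _).mpr hc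
              rw [ten_prefix_drop_append] at hj
              rcases hj with ⟨_, hpj⟩ | ⟨_, hpj⟩
              · exact absurd ((PySem.Chars.exists_prefix_drop_iff_isIn _ _).mp ⟨j, hpj⟩)
                  (by simp [hta])
              · exact absurd ((PySem.Chars.exists_prefix_drop_iff_isIn _ _).mp ⟨_, hpj⟩)
                  (by simp [hb10])
          rw [valB, valB]
          simp only [tenL, slashL, hfb, hfcs]
          norm_num
        | true =>
          have h0b : 0 ≤ PySem.Chars.find b ['1','0','.'] :=
            (PySem.Chars.find_nonneg_iff _ _).mpr ((PySem.Chars.isIn_iff_infix _ _).mp hb10)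
          obtain ⟨hprb, hminb⟩ := PySem.Chars.find_spec h0b
          set pb := (PySem.Chars.find b ['1','0','.']).toNat with hpb
          have hfb : PySem.Chars.find b ['1','0','.'] = (pb : Int) := by omega
          have hpb_le : pb ≤ b.length := by
            have := PySem.Chars.find_le_length b ['1','0','.']
            omega
          have hfcs : PySem.Chars.find (a ++ '/' :: b) ['1','0','.']
              = ((a.length + 1 + pb : Nat) : Int) := by
            rw [find_eq_natCast_iff]
            constructor
            · rw [ten_prefix_drop_append]
              refine Or.inr ⟨by omega, ?_⟩
              rw [show a.length + 1 + pb - a.length - 1 = pb by omega]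
              exact hprb
            · intro i hilt
              rw [ten_prefix_drop_append]
              rintro (⟨_, hpi⟩ | ⟨hgt, hpi⟩)
              · exact absurd ((PySem.Chars.exists_prefix_drop_iff_isIn _ _).mp ⟨i, hpi⟩)
                  (by simp [hta])
              · exact hminb (i - a.length - 1) (by omega) hpi
          rw [valB, valB]
          simp only [tenL, slashL, hfb, hfcs]
          rw [if_pos (by omega), if_pos (by omega)]
          rw [rfindFrom_zero_some _ _ _ (by omega) (by exact_mod_cast hpb_le)]
          rw [rfindFrom_zero_some _ _ _ (by omega)
            (by rw [← hfcs]; exact PySem.Chars.find_le_length _ _)]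
          rw [Int.toNat_natCast, Int.toNat_natCast]
          have htake : (a ++ '/' :: b).take (a.length + 1 + pb)
              = a ++ '/' :: b.take pb := by
            rw [List.take_append]
            rw [List.take_of_length_le (by omega)]
            rw [show a.length + 1 + pb - a.length = pb + 1 by omega]
            rfl
          rw [htake]
          by_cases hw : '/' ∈ b.take pb
          · obtain ⟨rb, hrw, hrcs⟩ := rfind_slash_append_of_mem a hw
            rw [slashL] at hrw hrcs
            rw [hrw, hrcs]
            congr 1
            rw [slice_from_nonneg _ _ (by omega), slice_from_nonneg _ _ (by omega)]
            rw [show ((rb : Int) + 1).toNat = rb + 1 by omega]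
            rw [show (((a.length + 1 + rb : Nat) : Int) + 1).toNat = a.length + (rb + 2) by omega]
            have hRHS : List.drop (a.length + (rb + 2)) (a ++ '/' :: b) = List.drop (rb + 1) b := by
              rw [List.drop_append, List.drop_eq_nil_of_le (by omega : a.length ≤ a.length + (rb + 2)),
                show a.length + (rb + 2) - a.length = (rb + 1) + 1 by omega, List.drop_succ_cons,
                List.nil_append]
            rw [hRHS]
          · have hrw := rfind_slash_of_not_mem hw
            have hrcs := rfind_slash_append_of_not_mem a hw
            rw [slashL] at hrw hrcs
            rw [hrw, hrcs]
            congr 1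
            rw [slice_from_nonneg _ _ (by omega), slice_from_nonneg _ _ (by omega)]
            rw [show ((-1 : Int) + 1).toNat = 0 by omega]
            rw [show (((a.length : Nat) : Int) + 1).toNat = a.length + 1 by omega]
            have hRHS : List.drop (a.length + 1) (a ++ '/' :: b) = b := by
              rw [List.drop_append, List.drop_eq_nil_of_le (by omega : a.length ≤ a.length + 1),
                show a.length + 1 - a.length = 0 + 1 by omega, List.drop_succ_cons,
                List.nil_append, List.drop_zero]
            rw [hRHS, List.drop_zero]

lemma valA_eq_valB (cs : List Char) :
    readDoisScanA (PySem.Chars.splitOn cs "/".toList) (PySem.Chars.splitOn cs "/".toList)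
      = valB cs := by
  rw [splitOn_eq_mySplit]
  exact valA_aux cs.length cs (le_refl _)

-- ===== VERDICT (by name: the statement is the Claim_ definition above) =====
theorem read_dois_spec : Claim_equal_read_dois := by
  intro dois_file _
  unfold Spec_read_dois read_dois read_dois_alt
  congr 1
  funext num_dois line
  simp only [valA_eq_valB, valB]
  cases hdorg : PySem.Chars.isIn "doi.org".toList (PySem.Chars.strip line.toList) with
  | false => simp
  | true =>
    simp only [if_true, tenL, slashL]
    by_cases hfind : PySem.Chars.find (PySem.Chars.strip line.toList) ['1','0','.'] = -1
    · rw [if_neg (not_not_intro hfind), if_neg (not_not_intro hfind)]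
    · rw [if_pos hfind, if_pos hfind]
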